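-- pv_equiv track=rewrite | github.com/drakoshllk/PracticalWork5 | Task 2.py | some_func
-- ===== SOURCE A (Python) =====
-- import random, math
--
-- def some_func(array):
--     positive_numbers_sum = sum(number for number in array if number > 0)
--     min_index, max_index = array.index(min(array)), array.index(max(array))
--     if min_index < max_index:
--         product_between_min_max = math.prod(array[min_index + 1:max_index])
--     else:
--         product_between_min_max = math.prod(array[max_index + 1:min_index])
--     return positive_numbers_sum, product_between_min_max
-- ===== SOURCE B (Python) =====
-- import math
--
-- def some_func(array):
--     pairs = [(value, index) for index, value in enumerate(array)]
--     ascending = sorted(pairs)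
--     negated = sorted([(-value, index) for value, index in pairs])
--     min_index = ascending[0][1]
--     max_index = negated[0][1]
--     lo, hi = min(min_index, max_index), max(min_index, max_index)
--     positive_numbers_sum = sum(value for value, _ in ascending if value > 0)
--     return positive_numbers_sum, math.prod(array[lo + 1:hi])
-- ===== Notes on version B (the rewrite author's own statement) =====
-- stated objective: alternative
-- what changed: Replaces A's min()/max() plus two list.index scans with a sort-based algorithm: sort the (value, index) pairs (and the negated pairs) once so that the first occurrence of the minimum and of the maximum are simply the heads of the two sorted lists, with tuple order handling first-occurrence ties; Pre_ excludes the empty list, on which A raises ValueError (and B IndexError).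
-- outside the precondition, e.g. on some_func([]): A raises ValueError, B raises IndexError
import Mathlib
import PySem

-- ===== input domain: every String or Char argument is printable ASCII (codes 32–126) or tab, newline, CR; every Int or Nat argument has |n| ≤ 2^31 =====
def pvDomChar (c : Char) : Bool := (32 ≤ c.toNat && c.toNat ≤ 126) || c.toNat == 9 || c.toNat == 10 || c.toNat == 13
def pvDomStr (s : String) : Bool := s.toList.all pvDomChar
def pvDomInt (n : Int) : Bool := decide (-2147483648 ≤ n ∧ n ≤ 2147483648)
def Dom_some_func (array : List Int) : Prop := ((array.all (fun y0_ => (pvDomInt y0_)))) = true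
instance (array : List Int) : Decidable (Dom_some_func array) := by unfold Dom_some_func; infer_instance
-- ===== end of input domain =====

-- B replaces A's min()/max() + two list.index scans by sorting the (value, index) pairs (and their
-- negations) once and reading both first-occurrence extremal indices off the heads (same result, different algorithm).

-- ===== PORT A =====
-- A: sum of a filtered generator, min()/max() with list.index, math.prod of the slice
def some_func (array : List Int) : Int × Int :=
  let positive_numbers_sum : Int := (array.filter (fun number => number > 0)).sum
  match PySem.List.min? array (fun x => x), PySem.List.max? array (fun x => x) with
  | some mn, some mx =>
    let min_index : Int := ((PySem.List.index? array mn).getD 0 : Nat)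
    let max_index : Int := ((PySem.List.index? array mx).getD 0 : Nat)
    let product_between_min_max : Int :=
      if min_index < max_index then
        (PySem.List.slice array (some (min_index + 1)) (some max_index)).foldl (· * ·) 1
      else
        (PySem.List.slice array (some (max_index + 1)) (some min_index)).foldl (· * ·) 1
    (positive_numbers_sum, product_between_min_max)
  | _, _ => (0, 0)  -- unreachable under Pre_ (Python min([]) raises ValueError)

-- ===== PORT B =====
-- B: pairs = [(value, index)]; sorted(pairs)[0] / sorted(negated pairs)[0] give the extremal first-occurrence indices
def some_func_alt (array : List Int) : Int × Int :=
  let pairs : List (Int × Int) := (PySem.List.enumerate array 0).map (fun p => (p.2, p.1))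
  let ascending := PySem.List.sorted2 pairs (fun p => p.1) (fun p => p.2)
  let negated := PySem.List.sorted2 (pairs.map (fun p => (-p.1, p.2))) (fun p => p.1) (fun p => p.2)
  match ascending, negated with
  | pmin :: _, pmax :: _ =>
    let min_index := pmin.2
    let max_index := pmax.2
    let lo := min min_index max_index
    let hi := max min_index max_index
    let positive_numbers_sum : Int :=
      ((ascending.filter (fun p => p.1 > 0)).map (fun p => p.1)).sum
    (positive_numbers_sum,
      (PySem.List.slice array (some (lo + 1)) (some hi)).foldl (· * ·) 1)
  | _, _ => (0, 0)  -- unreachable under Pre_ (ascending[0] raises IndexError on [])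

-- ===== PRECONDITION & SPEC =====
-- Pre_ excludes the empty list: A's min([]) raises ValueError there (B's ascending[0] raises IndexError).
def Pre_some_func (array : List Int) : Prop := array ≠ []
instance (array : List Int) : Decidable (Pre_some_func array) := by unfold Pre_some_func; infer_instance
def pvWitness_some_func : List Int := [3, -1, 4]

def Spec_some_func (array : List Int) (out : Int × Int) : Prop := out = some_func_alt array
instance (array : List Int) (out : Int × Int) : Decidable (Spec_some_func array out) := by unfold Spec_some_func; infer_instance

-- ===== CLAIM (what is proved, stated in full; the proofs are below) =====
def Claim_equal_some_func : Prop := ∀ (array : List Int), Dom_some_func array → Pre_some_func array → Spec_some_func array (some_func array)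

-- ===== LEMMAS AND PROOFS =====

-- inserting a non-smaller element keeps the head
theorem pv_insertBy_head_keep {α : Type} (before : α → α → Bool) (x m : α) (acc : List α)
    (hxm : before x m = false) (hh : acc.head? = some m) :
    (PySem.List.insertBy before x acc).head? = some m := by
  cases acc with
  | nil => simp at hh
  | cons a t =>
    have ha : a = m := by simpa using hh
    show (if before x a then x :: a :: t else a :: PySem.List.insertBy before x t).head? = some m
    rw [ha, hxm]
    simp

-- inserting the least element puts it at the head
theorem pv_insertBy_head_new {α : Type} (before : α → α → Bool) (m : α) (acc : List α)
    (hfirst : ∀ y ∈ acc, before m y = true) :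
    (PySem.List.insertBy before m acc).head? = some m := by
  cases acc with
  | nil => rfl
  | cons a t =>
    show (if before m a then m :: a :: t else a :: PySem.List.insertBy before m t).head? = some m
    rw [hfirst a (List.mem_cons_self)]
    simp

-- head of the insertion-sort fold is the unique 'before'-least element
theorem pv_head_foldl_insertBy {α : Type} (before : α → α → Bool) (m : α) :
    ∀ (xs acc : List α),
      (∀ y ∈ xs, y ≠ m → before m y = true) →
      (∀ y ∈ xs, before y m = false) →
      (∀ y ∈ acc, y ≠ m → before m y = true) →
      (∀ y ∈ acc, before y m = false) →
      (m ∈ acc → acc.head? = some m) →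
      (m ∈ acc ∨ m ∈ xs) →
      (xs.foldl (fun acc x => PySem.List.insertBy before x acc) acc).head? = some m := by
  intro xs
  induction xs with
  | nil =>
    intro acc _ _ _ _ hhead hmem
    simp only [List.foldl_nil]
    exact hhead (hmem.resolve_right (by simp))
  | cons x t ih =>
    intro acc hxs1 hxs2 hacc1 hacc2 hhead hmem
    simp only [List.foldl_cons]
    apply ih
    · intro y hy hne; exact hxs1 y (List.mem_cons_of_mem _ hy) hne
    · intro y hy; exact hxs2 y (List.mem_cons_of_mem _ hy)
    · intro y hy hne
      rcases (PySem.List.mem_insertBy before x y acc).1 hy with h | h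
      · rw [h] at hne ⊢; exact hxs1 x List.mem_cons_self hne
      · exact hacc1 y h hne
    · intro y hy
      rcases (PySem.List.mem_insertBy before x y acc).1 hy with h | h
      · rw [h]; exact hxs2 x List.mem_cons_self
      · exact hacc2 y h
    · intro hmin
      by_cases hxm : x = m
      · subst hxm
        by_cases hma : x ∈ acc
        · exact pv_insertBy_head_keep before x x acc
            (hxs2 x (List.mem_cons_self)) (hhead hma)
        · refine pv_insertBy_head_new before x acc (fun y hy => ?_)
          exact hacc1 y hy (fun h => hma (h ▸ hy))
      · by_cases hma : m ∈ acc
        · exact pv_insertBy_head_keep before x m acc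
            (hxs2 x (List.mem_cons_self)) (hhead hma)
        · rcases (PySem.List.mem_insertBy before x m acc).1 hmin with h | h
          · exact absurd h.symm hxm
          · exact absurd h hma
    · rcases hmem with h | h
      · exact Or.inl ((PySem.List.mem_insertBy before x m acc).2 (Or.inr h))
      · rcases List.mem_cons.1 h with h | h
        · exact Or.inl ((PySem.List.mem_insertBy before x m acc).2 (Or.inl h))
        · exact Or.inr h

-- the lex-least (value, index) pair is the head of sorted(pairs)
theorem pv_sorted2_head (xs : List (Int × Int)) (m : Int × Int)
    (hm : m ∈ xs)
    (h1 : ∀ y ∈ xs, y ≠ m → (m.1 < y.1 ∨ (¬ y.1 < m.1 ∧ m.2 < y.2)))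
    (h2 : ∀ y ∈ xs, ¬ (y.1 < m.1 ∨ (¬ m.1 < y.1 ∧ y.2 < m.2))) :
    (PySem.List.sorted2 xs (fun p => p.1) (fun p => p.2)).head? = some m := by
  show (xs.foldl (fun acc x => PySem.List.insertBy
      (fun a b => decide (a.1 < b.1) || (!decide (b.1 < a.1) && decide (a.2 < b.2))) x acc) []).head?
    = some m
  apply pv_head_foldl_insertBy _ m xs []
  · intro y hy hne
    rcases h1 y hy hne with h | ⟨h, h'⟩ <;> simp [*]
  · intro y hy
    have h3 := h2 y hy
    simp only [not_or, not_and, not_lt] at h3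
    simp [h3.1]
    exact h3.2
  · intro y hy; simp at hy
  · intro y hy; simp at hy
  · intro h; simp at h
  · exact Or.inr hm

-- the positive-sum generator over the pairs equals A's filtered sum
theorem pv_pairs_filter_map (xs : List Int) :
    ∀ (s : Int),
      (((PySem.List.enumerate xs s).map (fun p => (p.2, p.1))).filter
          (fun p => p.1 > 0)).map (fun p => p.1)
        = xs.filter (fun n => n > 0) := by
  induction xs with
  | nil => intro s; simp [PySem.List.enumerate_nil]
  | cons x t ih =>
    intro s
    by_cases hx : x > 0 <;>
      simp [PySem.List.enumerate_cons, hx, ih (s + 1)]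

-- membership in the (value, index) pair list
theorem pv_mem_pairs (array : List Int) (p : Int × Int) :
    p ∈ (PySem.List.enumerate array 0).map (fun p => (p.2, p.1)) ↔
      ∃ (k : Nat) (h : k < array.length), p = (array[k], (k : Int)) := by
  simp only [List.mem_map, PySem.List.mem_enumerate_iff]
  constructor
  · rintro ⟨q, ⟨k, hk, rfl⟩, rfl⟩; exact ⟨k, hk, by simp⟩
  · rintro ⟨k, hk, rfl⟩; exact ⟨(0 + k, array[k]), ⟨k, hk, rfl⟩, by simp⟩

-- ===== VERDICT (by name: the statement is the Claim_ definition above) =====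
theorem some_func_spec : Claim_equal_some_func := by
  intro array _ hpre
  unfold Spec_some_func some_func some_func_alt
  cases hmn : PySem.List.min? array (fun x => x) with
  | none => exact absurd ((PySem.List.min?_eq_none_iff _ _).1 hmn) hpre
  | some mn =>
  cases hmx : PySem.List.max? array (fun x => x) with
  | none => exact absurd ((PySem.List.max?_eq_none_iff _ _).1 hmx) hpre
  | some mx =>
  have hmnmem := PySem.List.min?_mem hmn
  have hmnmin := PySem.List.min?_isMin hmn
  have hmxmem := PySem.List.max?_mem hmx
  have hmxmax := PySem.List.max?_isMax hmx
  obtain ⟨imn, himn⟩ := Option.isSome_iff_exists.1 ((PySem.List.index?_isSome_iff _ _).2 hmnmem)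
  obtain ⟨imx, himx⟩ := Option.isSome_iff_exists.1 ((PySem.List.index?_isSome_iff _ _).2 hmxmem)
  obtain ⟨hkn, heqn, hfirstn⟩ := PySem.List.getElem_of_index?_eq_some himn
  obtain ⟨hkx, heqx, hfirstx⟩ := PySem.List.getElem_of_index?_eq_some himx
  -- the head of sorted(pairs) is (mn, imn)
  have hasc : (PySem.List.sorted2 ((PySem.List.enumerate array 0).map (fun p => (p.2, p.1)))
      (fun p => p.1) (fun p => p.2)).head? = some (mn, (imn : Int)) := by
    apply pv_sorted2_head
    · exact (pv_mem_pairs array _).2 ⟨imn, hkn, by rw [heqn]⟩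
    · intro y hy hne
      obtain ⟨k, hk, rfl⟩ := (pv_mem_pairs array y).1 hy
      by_cases hv : array[k] = mn
      · right
        refine ⟨by simp [hv], ?_⟩
        have hkne : k ≠ imn := fun h => hne (by simp [h, heqn])
        have : ¬ k < imn := fun h => hfirstn k h hv
        simp only []
        exact_mod_cast by omega
      · left
        have := hmnmin array[k] (List.getElem_mem hk)
        simp only []
        omega
    · intro y hy
      obtain ⟨k, hk, rfl⟩ := (pv_mem_pairs array y).1 hy
      have hge := hmnmin array[k] (List.getElem_mem hk)
      rintro (h | ⟨h1, h2⟩)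
      · simp only [] at h; omega
      · simp only [] at h1 h2
        have hv : array[k] = mn := by omega
        have : ¬ k < imn := fun h => hfirstn k h hv
        omega
  -- the head of sorted(negated pairs) is (-mx, imx)
  have hneg : (PySem.List.sorted2 (((PySem.List.enumerate array 0).map (fun p => (p.2, p.1))).map
      (fun p => (-p.1, p.2))) (fun p => p.1) (fun p => p.2)).head? = some (-mx, (imx : Int)) := by
    apply pv_sorted2_head
    · exact List.mem_map.2 ⟨(mx, imx), (pv_mem_pairs array _).2 ⟨imx, hkx, by rw [heqx]⟩, rfl⟩
    · intro y hy hne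
      obtain ⟨q, hq, rfl⟩ := List.mem_map.1 hy
      obtain ⟨k, hk, rfl⟩ := (pv_mem_pairs array q).1 hq
      by_cases hv : array[k] = mx
      · right
        refine ⟨by simp [hv], ?_⟩
        have hkne : k ≠ imx := fun h => hne (by simp [h, heqx])
        have : ¬ k < imx := fun h => hfirstx k h hv
        simp only []
        exact_mod_cast by omega
      · left
        have := hmxmax array[k] (List.getElem_mem hk)
        simp only []
        omega
    · intro y hy
      obtain ⟨q, hq, rfl⟩ := List.mem_map.1 hy
      obtain ⟨k, hk, rfl⟩ := (pv_mem_pairs array q).1 hq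
      have hle := hmxmax array[k] (List.getElem_mem hk)
      rintro (h | ⟨h1, h2⟩)
      · simp only [] at h; omega
      · simp only [] at h1 h2
        have hv : array[k] = mx := by omega
        have : ¬ k < imx := fun h => hfirstx k h hv
        omega
  obtain ⟨ta, hta⟩ : ∃ ta, (PySem.List.sorted2 ((PySem.List.enumerate array 0).map
      (fun p => (p.2, p.1))) (fun p => p.1) (fun p => p.2)) = (mn, (imn : Int)) :: ta := by
    cases h : (PySem.List.sorted2 ((PySem.List.enumerate array 0).map (fun p => (p.2, p.1)))
        (fun p => p.1) (fun p => p.2)) with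
    | nil => rw [h] at hasc; simp at hasc
    | cons a t => rw [h] at hasc; simp at hasc; exact ⟨t, by rw [hasc]⟩
  obtain ⟨tb, htb⟩ : ∃ tb, (PySem.List.sorted2 (((PySem.List.enumerate array 0).map
      (fun p => (p.2, p.1))).map (fun p => (-p.1, p.2))) (fun p => p.1) (fun p => p.2))
      = (-mx, (imx : Int)) :: tb := by
    cases h : (PySem.List.sorted2 (((PySem.List.enumerate array 0).map (fun p => (p.2, p.1))).map
        (fun p => (-p.1, p.2))) (fun p => p.1) (fun p => p.2)) with
    | nil => rw [h] at hneg; simp at hneg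
    | cons a t => rw [h] at hneg; simp at hneg; exact ⟨t, by rw [hneg]⟩
  simp only [hta, htb, himn, himx, Option.getD_some]
  have h0 : ((mn, (imn : Int)) :: ta).Perm ((PySem.List.enumerate array 0).map
      (fun p => (p.2, p.1))) := hta ▸ PySem.List.sorted2_perm _ _ _ _
  have hsum := ((h0.filter (fun p => decide (p.1 > 0))).map (fun p => p.1)).sum_eq
  rw [pv_pairs_filter_map array 0] at hsum
  refine Prod.ext ?_ ?_
  · exact hsum.symm
  · simp only []
    rcases lt_trichotomy (imn : Int) (imx : Int) with h | h | h
    · rw [if_pos h, min_eq_left (le_of_lt h), max_eq_right (le_of_lt h)]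
    · rw [if_neg (by omega), h, min_self, max_self]
    · rw [if_neg (by omega), min_eq_right (le_of_lt h), max_eq_left (le_of_lt h)]
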